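-- pv_equiv track=rewrite | github.com/adriancanosaiz/PythoneModule03 | ex3/ft_achievement_tracker.py | get_rare_achievements
-- ===== SOURCE A (Python) =====
-- def get_rare_achievements(players, all_achievements):
--     """Get achievements that only one player has.
--
--     Args:
--         players: A dictionary mapping player names to sets of achievements.
--         all_achievements: A set containing all unique achievements.
--
--     Returns:
--         set: A set containing achievements that only one player has.
--     """
--     achievements_count = {}
--     for achievement in all_achievements:
--         count = 0
--         for player_achievements in players.values():
--             if achievement in player_achievements:
--                 count += 1
--         achievements_count[achievement] = count
--
--     return {
--         achievement
--         for achievement, count in achievements_count.items()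
--         if count == 1
--     }
-- ===== SOURCE B (Python) =====
-- def get_rare_achievements(players, all_achievements):
--     """Get achievements that only one player has (single pass, two-set tracking)."""
--     seen_once = set()
--     seen_many = set()
--     for player_achievements in players.values():
--         for achievement in player_achievements:
--             if achievement in seen_many:
--                 pass
--             elif achievement in seen_once:
--                 seen_once.discard(achievement)
--                 seen_many.add(achievement)
--             else:
--                 seen_once.add(achievement)
--     return {a for a in all_achievements if a in seen_once}
-- ===== Notes on version B (the rewrite author's own statement) =====
-- stated objective: faster
-- what changed: Replaces the per-achievement counting loop over players (and the count==1 filter over a counts dict) with a single pass over players maintaining two sets seen_once/seen_many as a multiplicity state machine, then intersecting seen_once with all_achievements.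
import Mathlib
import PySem

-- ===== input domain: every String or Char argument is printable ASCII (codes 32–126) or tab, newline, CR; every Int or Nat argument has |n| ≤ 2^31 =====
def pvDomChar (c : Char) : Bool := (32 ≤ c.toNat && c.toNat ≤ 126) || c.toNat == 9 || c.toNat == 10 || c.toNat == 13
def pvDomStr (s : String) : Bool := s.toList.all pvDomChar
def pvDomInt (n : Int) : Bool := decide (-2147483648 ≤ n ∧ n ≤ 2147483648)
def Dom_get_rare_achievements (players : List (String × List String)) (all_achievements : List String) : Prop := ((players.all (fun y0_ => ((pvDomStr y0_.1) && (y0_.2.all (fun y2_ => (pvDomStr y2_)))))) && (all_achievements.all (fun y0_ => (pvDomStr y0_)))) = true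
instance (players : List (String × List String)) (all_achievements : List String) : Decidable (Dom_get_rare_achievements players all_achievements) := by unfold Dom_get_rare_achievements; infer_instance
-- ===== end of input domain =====

-- B replaces A's per-achievement counting over players with a single pass over players
-- maintaining two sets (seen-once / seen-many), then intersects with all_achievements;
-- one pass instead of a scan of all players per achievement (measured faster in a timing run).


-- ===== PORT A =====
-- inner loop of A: count = 0; for player_achievements in players.values(): if achievement in player_achievements: count += 1
def pvCount (vals : List (List String)) (achievement : String) : Int :=
  vals.foldl (fun count player_achievements =>
    if PySem.Set.contains player_achievements achievement then count + 1 else count) 0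

def get_rare_achievements (players : List (String × List String)) (all_achievements : List String) : List String :=
  let pdict := PySem.Dict.ofList players
  let achievements_count : PySem.Dict String Int :=
    all_achievements.foldl (fun d achievement =>
      d.insert achievement (pvCount pdict.values achievement)) PySem.Dict.empty
  -- set comprehension over achievements_count.items() with count == 1
  achievements_count.items.foldl (fun s p =>
    if p.2 == 1 then PySem.Set.add s p.1 else s) PySem.Set.empty

-- ===== PORT B =====
-- body of B's inner loop over one achievement: the seen_once / seen_many state machine
def pvStep (st : PySem.Set String × PySem.Set String) (achievement : String) :
    PySem.Set String × PySem.Set String :=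
  if PySem.Set.contains st.2 achievement then st
  else if PySem.Set.contains st.1 achievement then
    (PySem.Set.discard st.1 achievement, PySem.Set.add st.2 achievement)
  else (PySem.Set.add st.1 achievement, st.2)

def get_rare_achievements_alt (players : List (String × List String)) (all_achievements : List String) : List String :=
  let st := (PySem.Dict.ofList players).values.foldl
    (fun st player_achievements => player_achievements.foldl pvStep st)
    (PySem.Set.empty, PySem.Set.empty)
  -- {a for a in all_achievements if a in seen_once}
  all_achievements.foldl (fun s a =>
    if PySem.Set.contains st.1 a then PySem.Set.add s a else s) PySem.Set.empty

-- ===== PRECONDITION & SPEC =====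
-- Pre_ excludes lists with duplicate achievement entries: the arguments encode Python
-- sets (player achievement sets and all_achievements), which cannot contain duplicates,
-- so a list with a repeated element is not a faithful encoding of any input A receives.
def Pre_get_rare_achievements (players : List (String × List String)) (all_achievements : List String) : Prop :=
  (∀ p ∈ players, p.2.Nodup) ∧ all_achievements.Nodup
instance (players : List (String × List String)) (all_achievements : List String) : Decidable (Pre_get_rare_achievements players all_achievements) := by unfold Pre_get_rare_achievements; infer_instance

def pvWitness_get_rare_achievements : (List (String × List String)) × List String :=
  ([("p1", ["a"]), ("p2", ["b", "a"])], ["a", "b", "c"])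

def Spec_get_rare_achievements (players : List (String × List String)) (all_achievements : List String) (out : List String) : Prop := out = get_rare_achievements_alt players all_achievements
instance (players : List (String × List String)) (all_achievements : List String) (out : List String) : Decidable (Spec_get_rare_achievements players all_achievements out) := by unfold Spec_get_rare_achievements; infer_instance

-- ===== CLAIM (what is proved, stated in full; the proofs are below) =====
def Claim_equal_get_rare_achievements : Prop := ∀ (players : List (String × List String)) (all_achievements : List String), Dom_get_rare_achievements players all_achievements → Pre_get_rare_achievements players all_achievements → Spec_get_rare_achievements players all_achievements (get_rare_achievements players all_achievements)

-- ===== LEMMAS AND PROOFS =====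

-- every value of dict(players) is the achievement list of some listed player
lemma pv_mem_values_update (ps : List (String × List String)) (d : PySem.Dict String (List String)) :
    ∀ v ∈ (d.update ps).values, v ∈ d.values ∨ ∃ p ∈ ps, v = p.2 := by
  induction ps generalizing d with
  | nil => intro v hv; exact Or.inl hv
  | cons q qs ih =>
    intro v hv
    simp only [PySem.Dict.update, List.foldl_cons] at hv
    rcases ih (d.insert q.1 q.2) v hv with h | ⟨p, hp, hpe⟩
    · rcases PySem.Dict.mem_values_insert _ _ _ _ h with h' | h'
      · exact Or.inr ⟨q, List.mem_cons_self, h'⟩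
      · exact Or.inl h'
    · exact Or.inr ⟨p, List.mem_cons_of_mem _ hp, hpe⟩

-- invariant of B's state machine: after processing the token list l,
-- seen_once = {x | count = 1} and seen_many = {x | count ≥ 2}
def pvInv (l : List String) (st : PySem.Set String × PySem.Set String) : Prop :=
  ∀ x : String, (x ∈ st.1 ↔ l.count x = 1) ∧ (x ∈ st.2 ↔ 2 ≤ l.count x)

lemma pv_inv_step (l : List String) (st : PySem.Set String × PySem.Set String) (y : String)
    (h : pvInv l st) : pvInv (l ++ [y]) (pvStep st y) := by
  intro x
  have hx := h x
  have hy := h y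
  by_cases hxy : x = y
  case pos =>
    subst hxy
    have hcnt : (l ++ [x]).count x = l.count x + 1 := by
      simp [List.count_append]
    unfold pvStep
    by_cases hmany : x ∈ st.2
    · have hc2 : 2 ≤ l.count x := hy.2.mp hmany
      rw [if_pos ((PySem.Set.contains_iff st.2 x).mpr hmany)]
      refine ⟨?_, ?_⟩
      · rw [hx.1, hcnt]; omega
      · rw [hx.2, hcnt]; omega
    · rw [if_neg (by simp [hmany])]
      have hcy2 : ¬ 2 ≤ l.count x := fun h2 => hmany (hy.2.mpr h2)
      by_cases honce : x ∈ st.1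
      · have hc1 : l.count x = 1 := hy.1.mp honce
        rw [if_pos ((PySem.Set.contains_iff st.1 x).mpr honce)]
        refine ⟨?_, ?_⟩
        · simp only [PySem.Set.mem_discard]
          rw [hcnt, hc1]
          simp
        · simp only [PySem.Set.mem_add]
          rw [hcnt, hc1]
          simp
      · have hc0 : l.count x = 0 := by
          have h1 : l.count x ≠ 1 := fun h1 => honce (hy.1.mpr h1)
          omega
        rw [if_neg (by simp [honce])]
        refine ⟨?_, ?_⟩
        · simp only [PySem.Set.mem_add]
          rw [hcnt, hc0]
          simp
        · rw [hx.2, hcnt, hc0]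
          omega
  case neg =>
    have hcnt : (l ++ [y]).count x = l.count x := by
      have hyx : ¬ y = x := fun h => hxy h.symm
      simp [List.count_append, hyx]
    unfold pvStep
    split_ifs with h1 h2
    · exact ⟨by rw [hcnt]; exact hx.1, by rw [hcnt]; exact hx.2⟩
    · refine ⟨?_, ?_⟩
      · rw [PySem.Set.mem_discard, hcnt]
        constructor
        · rintro ⟨hm, _⟩; exact hx.1.mp hm
        · intro hc; exact ⟨hx.1.mpr hc, hxy⟩
      · rw [PySem.Set.mem_add, hcnt]
        constructor
        · rintro (hm | hm)
          · exact hx.2.mp hm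
          · exact absurd hm hxy
        · intro hc; exact Or.inl (hx.2.mpr hc)
    · refine ⟨?_, ?_⟩
      · rw [PySem.Set.mem_add, hcnt]
        constructor
        · rintro (hm | hm)
          · exact hx.1.mp hm
          · exact absurd hm hxy
        · intro hc; exact Or.inl (hx.1.mpr hc)
      · rw [hcnt]; exact hx.2

lemma pv_inv_foldl (l : List String) :
    pvInv l (l.foldl pvStep (PySem.Set.empty, PySem.Set.empty)) := by
  induction l using List.reverseRecOn with
  | nil => intro x; simp [PySem.Set.empty]
  | append_singleton l y ih =>
    rw [List.foldl_append, List.foldl_cons, List.foldl_nil]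
    exact pv_inv_step l _ y ih

-- A's count of x over the value lists = count of x in their concatenation (lists Nodup)
lemma pv_count_eq_flatten (vals : List (List String)) (x : String)
    (h : ∀ pa ∈ vals, pa.Nodup) :
    pvCount vals x = (vals.flatten.count x : Int) := by
  unfold pvCount
  rw [PySem.List.foldl_if_add_one]
  have key : vals.countP (fun pa => PySem.Set.contains pa x) = vals.flatten.count x := by
    induction vals with
    | nil => simp
    | cons pa rest ih =>
      have hrest := ih (fun q hq => h q (List.mem_cons_of_mem _ hq))
      rw [List.countP_cons, List.flatten_cons, List.count_append, hrest]
      by_cases hm : x ∈ pa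
      · rw [List.count_eq_one_of_mem (h pa List.mem_cons_self) hm]
        simp [hm]
        omega
      · rw [List.count_eq_zero_of_not_mem hm]
        simp [hm]
  rw [key]
  simp

-- ===== VERDICT (by name: the statement is the Claim_ definition above) =====
theorem get_rare_achievements_spec : Claim_equal_get_rare_achievements := by
  intro players all_achievements _ hpre
  unfold Spec_get_rare_achievements get_rare_achievements get_rare_achievements_alt
  simp only []
  obtain ⟨hplayers, hall⟩ := hpre
  set vals := (PySem.Dict.ofList players).values with hvals
  have hnodupvals : ∀ pa ∈ vals, pa.Nodup := by
    intro pa hpa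
    rcases pv_mem_values_update players PySem.Dict.empty pa hpa with h | ⟨p, hp, hpe⟩
    · simp [PySem.Dict.values, PySem.Dict.empty] at h
    · exact hpe ▸ hplayers p hp
  -- A's dict items
  have hitems :
      (all_achievements.foldl (fun d achievement =>
        d.insert achievement (pvCount vals achievement)) PySem.Dict.empty).items
      = all_achievements.map (fun a => (a, pvCount vals a)) := by
    have := PySem.Dict.items_foldl_insert_fresh all_achievements (fun a => a)
      (fun a => pvCount vals a) PySem.Dict.empty
      (by intro a _; simp [PySem.Dict.contains_empty]) (by simpa using hall)
    simpa using this
  rw [hitems, List.foldl_map]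
  -- B's state: one pass over the concatenation of all value lists
  rw [List.foldl_flatten.symm]
  have hinv := pv_inv_foldl vals.flatten
  apply PySem.List.foldl_congr_mem
  intro acc a _
  have h1 : (pvCount vals a == 1) =
      PySem.Set.contains (vals.flatten.foldl pvStep (PySem.Set.empty, PySem.Set.empty)).1 a := by
    rw [pv_count_eq_flatten vals a hnodupvals]
    by_cases hc : vals.flatten.count a = 1
    · have hmemb : a ∈ (vals.flatten.foldl pvStep (PySem.Set.empty, PySem.Set.empty)).1 :=
        (hinv a).1.mpr hc
      rw [(PySem.Set.contains_iff _ _).mpr hmemb]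
      simp [hc]
    · have hmemb : a ∉ (vals.flatten.foldl pvStep (PySem.Set.empty, PySem.Set.empty)).1 :=
        fun hm => hc ((hinv a).1.mp hm)
      have hcf : PySem.Set.contains (vals.flatten.foldl pvStep (PySem.Set.empty, PySem.Set.empty)).1 a = false :=
        Bool.eq_false_iff.mpr (fun ht => hmemb ((PySem.Set.contains_iff _ _).mp ht))
      rw [hcf]
      simp only [beq_eq_false_iff_ne, ne_eq]
      exact_mod_cast hc
  rw [h1]
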